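-- pv_equiv track=rewrite | github.com/IsakEd/AdventOfCode2023 | 7/others.py | get_hand_combinations
-- ===== SOURCE A (Python) =====
-- def get_hand_combinations(prefix, index, hand, possibilities):
--     if index == 5:
--         yield prefix
--         return
--
--     if hand[index] == "J":
--         for p in possibilities:
--             yield from get_hand_combinations(prefix + p, index + 1, hand, possibilities)
--     else:
--         yield from get_hand_combinations(
--             prefix + hand[index], index + 1, hand, possibilities
--         )
-- ===== SOURCE B (Python) =====
-- def get_hand_combinations(prefix, index, hand, possibilities):
--     # Iterative Cartesian-product enumeration instead of recursion:
--     # build one choice-list per remaining position, then fold the product.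
--     choices = [possibilities if hand[i] == "J" else [hand[i]] for i in range(index, 5)]
--     results = [prefix]
--     for choice in choices:
--         results = [r + c for r in results for c in choice]
--     yield from results
-- ===== Notes on version B (the rewrite author's own statement) =====
-- stated objective: idiomatic
-- what changed: Replaces the recursive generator with an iterative Cartesian-product fold: one choice-list per position (possibilities for 'J', the single card otherwise), then a left fold that extends every partial string by every choice, preserving A's order.
-- outside the precondition, e.g. on get_hand_combinations('J', 6, 'JJJJJJJJJJ', []): A returns [], B returns ['J']; on get_hand_combinations('', 0, 'J', []): A returns [], B raises IndexError
import Mathlib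
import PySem

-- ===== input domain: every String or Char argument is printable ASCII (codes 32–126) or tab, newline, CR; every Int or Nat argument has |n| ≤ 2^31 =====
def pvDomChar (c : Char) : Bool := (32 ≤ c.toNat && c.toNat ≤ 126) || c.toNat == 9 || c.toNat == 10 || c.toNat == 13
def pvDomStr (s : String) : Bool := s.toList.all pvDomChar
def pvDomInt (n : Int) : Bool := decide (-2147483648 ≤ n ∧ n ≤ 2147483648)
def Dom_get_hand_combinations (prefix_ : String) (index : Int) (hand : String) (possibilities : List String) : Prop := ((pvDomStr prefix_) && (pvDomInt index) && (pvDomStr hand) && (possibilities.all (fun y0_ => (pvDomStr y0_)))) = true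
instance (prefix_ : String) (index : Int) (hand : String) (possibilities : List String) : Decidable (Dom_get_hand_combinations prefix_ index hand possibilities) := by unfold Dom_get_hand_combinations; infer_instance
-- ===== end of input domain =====

-- B replaces A's recursion by an iterative Cartesian-product fold over per-position choice lists (idiomatic; same order, same cost).
-- Both ports work on List Char internally (Lean's String.append is kernel-opaque) and rebuild Strings with String.ofList.

-- ===== PORT A =====
-- Literal transliteration of A's recursion; fuel (5 - index).toNat only makes the recursion total (A raises outside Pre_).
def pvGoA (fuel : Nat) (p : List Char) (i : Int) (hand : String) (ps : List String) : List (List Char) :=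
  if i = 5 then [p]
  else
    match fuel with
    | 0 => []  -- unreachable under Pre_
    | n + 1 =>
      match PySem.Str.pyGet? hand i with
      | none => []  -- IndexError in Python: excluded by Pre_
      | some c =>
        if c = 'J' then
          ps.foldl (fun acc q => acc ++ pvGoA n (p ++ q.toList) (i + 1) hand ps) []
        else
          pvGoA n (p ++ [c]) (i + 1) hand ps

def get_hand_combinations (prefix_ : String) (index : Int) (hand : String) (possibilities : List String) : List String :=
  (pvGoA (5 - index).toNat prefix_.toList index hand possibilities).map String.ofList

-- ===== PORT B =====
-- one product step: results = [r + c for r in results for c in choice]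
def pvProdStep (acc : List (List Char)) (choice : List (List Char)) : List (List Char) :=
  acc.flatMap (fun r => choice.map (fun c => r ++ c))

def get_hand_combinations_alt (prefix_ : String) (index : Int) (hand : String) (possibilities : List String) : List String :=
  let choices : List (List (List Char)) :=
    (PySem.List.pyRange index 5 1).map (fun j =>
      match PySem.Str.pyGet? hand j with
      | none => []  -- IndexError in Python: excluded by Pre_
      | some c => if c = 'J' then possibilities.map (·.toList) else [[c]])
  ((choices.foldl pvProdStep [prefix_.toList]).map String.ofList)

-- ===== PRECONDITION & SPEC =====
-- Pre_ excludes out-of-protocol inputs (index > 5, or some position in index..4 not a valid Python index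
-- into hand): there A usually raises IndexError, and when it does return (an empty possibilities list meets
-- a 'J' before the first bad access) its [] is an accident of the recursion short-circuiting on the empty loop.
def Pre_get_hand_combinations (prefix_ : String) (index : Int) (hand : String) (possibilities : List String) : Prop :=
  index = 5 ∨ (index < 5 ∧ 5 ≤ (hand.toList.length : Int) ∧ -(hand.toList.length : Int) ≤ index)
instance (prefix_ : String) (index : Int) (hand : String) (possibilities : List String) : Decidable (Pre_get_hand_combinations prefix_ index hand possibilities) := by unfold Pre_get_hand_combinations; infer_instance

def pvWitness_get_hand_combinations : String × Int × String × List String := ("", 0, "2J3JK", ["A", "K"])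

def Spec_get_hand_combinations (prefix_ : String) (index : Int) (hand : String) (possibilities : List String) (out : List String) : Prop := out = get_hand_combinations_alt prefix_ index hand possibilities
instance (prefix_ : String) (index : Int) (hand : String) (possibilities : List String) (out : List String) : Decidable (Spec_get_hand_combinations prefix_ index hand possibilities out) := by unfold Spec_get_hand_combinations; infer_instance

-- ===== CLAIM (what is proved, stated in full; the proofs are below) =====
def Claim_equal_get_hand_combinations : Prop := ∀ (prefix_ : String) (index : Int) (hand : String) (possibilities : List String), Dom_get_hand_combinations prefix_ index hand possibilities → Pre_get_hand_combinations prefix_ index hand possibilities → Spec_get_hand_combinations prefix_ index hand possibilities (get_hand_combinations prefix_ index hand possibilities)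


-- ===== LEMMAS AND PROOFS =====

theorem pvProdStep_append (a b : List (List Char)) (ch : List (List Char)) :
    pvProdStep (a ++ b) ch = pvProdStep a ch ++ pvProdStep b ch := by
  simp [pvProdStep]

theorem foldl_pvProdStep_append (rest : List (List (List Char))) (a b : List (List Char)) :
    rest.foldl pvProdStep (a ++ b) = rest.foldl pvProdStep a ++ rest.foldl pvProdStep b := by
  induction rest generalizing a b with
  | nil => rfl
  | cons ch rest ih => simp only [List.foldl_cons, pvProdStep_append, ih]

theorem foldl_pvProdStep_flatMap (rest : List (List (List Char))) (xs : List (List Char)) :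
    rest.foldl pvProdStep xs = xs.flatMap (fun x => rest.foldl pvProdStep [x]) := by
  induction xs with
  | nil =>
    induction rest with
    | nil => rfl
    | cons ch rest ih => simpa [pvProdStep] using ih
  | cons x xs ih =>
    have : (x :: xs) = [x] ++ xs := rfl
    rw [this, foldl_pvProdStep_append, ih]
    simp

def pvChoices (index : Int) (hand : String) (ps : List String) : List (List (List Char)) :=
  (PySem.List.pyRange index 5 1).map (fun j =>
    match PySem.Str.pyGet? hand j with
    | none => []
    | some c => if c = 'J' then ps.map (·.toList) else [[c]])

theorem pvGoA_eq_fold (fuel : Nat) (p : List Char) (i : Int) (hand : String) (ps : List String)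
    (hle : i ≤ 5) (hfuel : (5 - i).toNat ≤ fuel)
    (hvalid : ∀ j : Int, i ≤ j → j < 5 → (PySem.Str.pyGet? hand j).isSome) :
    pvGoA fuel p i hand ps = (pvChoices i hand ps).foldl pvProdStep [p] := by
  induction fuel generalizing p i with
  | zero =>
    have hi5 : i = 5 := by omega
    subst hi5
    simp [pvGoA, pvChoices, PySem.List.pyRange_one_eq_nil (by omega : (5:Int) ≤ 5)]
  | succ n ih =>
    by_cases hi5 : i = 5
    · subst hi5
      simp [pvGoA, pvChoices, PySem.List.pyRange_one_eq_nil (by omega : (5:Int) ≤ 5)]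
    · have hi : i < 5 := by omega
      have hsome := hvalid i le_rfl hi
      obtain ⟨c, hc⟩ := Option.isSome_iff_exists.mp hsome
      have hc' : PySem.List.pyGet? hand.toList i = some c := by
        simpa [PySem.Str.pyGet?] using hc
      have hcons : pvChoices i hand ps
          = (if c = 'J' then ps.map (·.toList) else [[c]]) :: pvChoices (i + 1) hand ps := by
        simp [pvChoices, PySem.List.pyRange_one_cons hi, hc']
      have ihcall : ∀ q : List Char, pvGoA n q (i + 1) hand ps
          = (pvChoices (i + 1) hand ps).foldl pvProdStep [q] := fun q =>
        ih q (i + 1) (by omega) (by omega) (fun j h1 h2 => hvalid j (by omega) h2)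
      rw [hcons]
      simp only [List.foldl_cons]
      by_cases hJ : c = 'J'
      · simp only [pvGoA, if_neg hi5, hc]
        simp only [if_pos hJ]
        rw [PySem.List.foldl_append_eq_flatMap, foldl_pvProdStep_flatMap]
        simp only [pvProdStep, List.flatMap_cons, List.flatMap_nil,
          List.append_nil, List.nil_append, List.flatMap_map, ihcall]
      · simp only [pvGoA, if_neg hi5, hc, if_neg hJ]
        rw [ihcall (p ++ [c])]
        simp [pvProdStep]

-- ===== VERDICT (by name: the statement is the Claim_ definition above) =====
theorem get_hand_combinations_spec : Claim_equal_get_hand_combinations := by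
  intro prefix_ index hand possibilities _ hpre
  unfold Spec_get_hand_combinations get_hand_combinations get_hand_combinations_alt
  have hle : index ≤ 5 := by rcases hpre with h | ⟨h, _, _⟩ <;> omega
  have hvalid : ∀ j : Int, index ≤ j → j < 5 → (PySem.Str.pyGet? hand j).isSome := by
    intro j h1 h2
    rcases hpre with h | ⟨hlt, hlen, hneg⟩
    · omega
    · rw [Option.isSome_iff_ne_none]
      intro hnone
      simp only [PySem.Str.pyGet?, PySem.Chars.pyGet?] at hnone
      rw [PySem.List.pyGet?_eq_none_iff] at hnone
      exact hnone ⟨by omega, by omega⟩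
  rw [pvGoA_eq_fold (5 - index).toNat prefix_.toList index hand possibilities hle le_rfl hvalid]
  rfl
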